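-- pv_equiv track=rewrite | github.com/pypi-data/pypi-mirror-332 | packages/bamboolang/bamboolang-1.0.0.tar.gz/bamboolang-1.0.0/bamboo/optim/SW/helper.py | CutFieldName
-- ===== SOURCE A (Python) =====
-- def CutFieldName(name: str) -> str:
--     f = False
--     fieldname: str = ""
--     for x in name:
--         if x == "%" or x == "-" or x == ">":
--             f = True
--         else:
--             if f:
--                 fieldname += x
--     if f:
--         return fieldname
--     else:
--         return name
-- ===== SOURCE B (Python) =====
-- def CutFieldName(name: str) -> str:
--     # Normalize all delimiters to one, split into segments, join everything after the first segment.
--     parts = name.replace('-', '%').replace('>', '%').split('%')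
--     if len(parts) == 1:
--         return name
--     return ''.join(parts[1:])
-- ===== Notes on version B (the rewrite author's own statement) =====
-- stated objective: simpler
-- what changed: Replaces the flag-carrying character scan with a staged split-and-join: normalize every delimiter to a single one with str.replace, split on it, and join all segments after the first (or return name unchanged if there is only one segment).
import Mathlib
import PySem

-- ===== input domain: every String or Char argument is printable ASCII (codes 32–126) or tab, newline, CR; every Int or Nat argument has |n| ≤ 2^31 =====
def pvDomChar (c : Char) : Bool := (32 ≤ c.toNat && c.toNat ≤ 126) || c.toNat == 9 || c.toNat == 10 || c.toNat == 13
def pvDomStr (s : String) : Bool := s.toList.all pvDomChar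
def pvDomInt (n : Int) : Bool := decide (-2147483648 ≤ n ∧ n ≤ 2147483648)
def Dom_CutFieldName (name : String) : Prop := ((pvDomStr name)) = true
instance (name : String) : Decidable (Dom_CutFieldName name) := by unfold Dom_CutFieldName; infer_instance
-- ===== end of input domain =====

-- B replaces A's flag-carrying scan with normalize-then-split-then-join-tail (simpler staged decomposition, same cost).


-- ===== PORT A =====
-- literal port of A: fold over the characters carrying the flag `f` and the accumulated `fieldname`
def pvStepA (s : Bool × List Char) (x : Char) : Bool × List Char :=
  if x = '%' ∨ x = '-' ∨ x = '>' then (true, s.2)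
  else if s.1 then (s.1, s.2 ++ [x]) else s

def CutFieldName (name : String) : String :=
  let st := name.toList.foldl pvStepA (false, [])
  if st.1 then String.ofList st.2 else name

-- ===== PORT B =====
-- port of str.replace('-','%').replace('>','%') on a single character
def pvNorm (c : Char) : Char := if c = '-' then '%' else if c = '>' then '%' else c

-- port of str.split('%'): returns (first segment, remaining segments); exact hand port of Python's split on a single character
def pvSplitPct : List Char → List Char × List (List Char)
  | [] => ([], [])
  | c :: t =>
    let r := pvSplitPct t
    if c = '%' then ([], r.1 :: r.2) else (c :: r.1, r.2)

def CutFieldName_alt (name : String) : String :=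
  let parts := pvSplitPct (name.toList.map pvNorm)
  if parts.2.isEmpty then name else String.ofList parts.2.flatten

-- ===== PRECONDITION & SPEC =====
def Spec_CutFieldName (name : String) (out : String) : Prop := out = CutFieldName_alt name
instance (name : String) (out : String) : Decidable (Spec_CutFieldName name out) := by unfold Spec_CutFieldName; infer_instance

-- ===== CLAIM (what is proved, stated in full; the proofs are below) =====
def Claim_equal_CutFieldName : Prop := ∀ (name : String), Dom_CutFieldName name → Spec_CutFieldName name (CutFieldName name)

-- ===== LEMMAS AND PROOFS =====
def pvIsDelim (c : Char) : Bool := c = '%' || c = '-' || c = '>'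

theorem pvNorm_delim (c : Char) (h : c = '%' ∨ c = '-' ∨ c = '>') : pvNorm c = '%' := by
  unfold pvNorm; rcases h with h | h | h <;> simp [h]

theorem pvNorm_nondelim (c : Char) (h : ¬(c = '%' ∨ c = '-' ∨ c = '>')) :
    pvNorm c = c ∧ c ≠ '%' := by
  push Not at h
  exact ⟨by simp [pvNorm, h.2.1, h.2.2], h.1⟩

theorem pvIsDelim_iff (c : Char) : pvIsDelim c = true ↔ (c = '%' ∨ c = '-' ∨ c = '>') := by
  simp [pvIsDelim, or_assoc]

-- once the flag is set, A just appends every non-delimiter character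
theorem pvFoldA_true (l : List Char) : ∀ acc,
    l.foldl pvStepA (true, acc) = (true, acc ++ l.filter (fun c => !pvIsDelim c)) := by
  induction l with
  | nil => intro acc; simp
  | cons h t ih =>
    intro acc
    by_cases hd : h = '%' ∨ h = '-' ∨ h = '>'
    · have : pvIsDelim h = true := (pvIsDelim_iff h).mpr hd
      simp [pvStepA, hd, this, ih]
    · have : pvIsDelim h = false := by
        cases h1 : pvIsDelim h
        · rfl
        · exact absurd ((pvIsDelim_iff h).mp h1) hd
      simp [pvStepA, hd, this, ih]

-- first segment ++ flatten of the rest = all non-delimiter characters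
theorem pvSplit_all (l : List Char) :
    (pvSplitPct (l.map pvNorm)).1 ++ (pvSplitPct (l.map pvNorm)).2.flatten
      = l.filter (fun c => !pvIsDelim c) := by
  induction l with
  | nil => simp [pvSplitPct]
  | cons c t ih =>
    by_cases hd : c = '%' ∨ c = '-' ∨ c = '>'
    · have hn := pvNorm_delim c hd
      have hdel : pvIsDelim c = true := (pvIsDelim_iff c).mpr hd
      simp [pvSplitPct, hn, hdel, ih]
    · obtain ⟨hn, hne⟩ := pvNorm_nondelim c hd
      have hdel : pvIsDelim c = false := by
        cases h1 : pvIsDelim c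
        · rfl
        · exact absurd ((pvIsDelim_iff c).mp h1) hd
      simp [pvSplitPct, hn, hne, hdel, ih]

-- A's fold computes B's split result: flag = "some delimiter seen", output = flatten of the tail segments
theorem pvFoldA_split (l : List Char) :
    l.foldl pvStepA (false, []) =
      (!(pvSplitPct (l.map pvNorm)).2.isEmpty, (pvSplitPct (l.map pvNorm)).2.flatten) := by
  induction l with
  | nil => simp [pvSplitPct]
  | cons c t ih =>
    by_cases hd : c = '%' ∨ c = '-' ∨ c = '>'
    · have hn := pvNorm_delim c hd
      simp [pvStepA, hd, hn, pvSplitPct, pvFoldA_true, pvSplit_all]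
    · obtain ⟨hn, hne⟩ := pvNorm_nondelim c hd
      have h2 : ¬(c = '-' ∨ c = '>') := fun h => hd (Or.inr h)
      simp [pvStepA, h2, hn, hne, pvSplitPct, ih]

-- ===== VERDICT (by name: the statement is the Claim_ definition above) =====
theorem CutFieldName_spec : Claim_equal_CutFieldName := by
  intro name _
  unfold Spec_CutFieldName CutFieldName CutFieldName_alt
  rw [pvFoldA_split]
  cases h : (pvSplitPct (name.toList.map pvNorm)).2 with
  | nil => simp [h]
  | cons x tail => simp [h]
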